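-- pv_equiv track=rewrite | github.com/JinkaiGUAN/Deep-Learning | src/full_year.py | _self_sort
-- ===== SOURCE A (Python) =====
-- def _self_sort(value_list, reverse_mark=True):
--     r"""Convert a list into a sorted list, but return the position
--     information. For example, if the number 123 is the 35th largest in a
--     list, the return list will have 35 at the corresponding place."""
--
--     position_list = [i for i in range(1, len(value_list) + 1)]
--     sorted_value = sorted(value_list, reverse=reverse_mark)
--
--     position_info = []
--     for num in value_list:
--         for pos_mark, num_mark in zip(position_list, sorted_value):
--             if int(num) == int(num_mark):
--                 position_info.append(pos_mark)
--                 break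
--     return position_info
-- ===== SOURCE B (Python) =====
-- def _self_sort(value_list, reverse_mark=True):
--     r"""Rank of each element in input order: 1 + number of elements that
--     strictly outrank it (greater when reverse_mark, smaller otherwise).
--     No sorting needed."""
--     if reverse_mark:
--         return [1 + sum(int(x) > int(num) for x in value_list) for num in value_list]
--     return [1 + sum(int(x) < int(num) for x in value_list) for num in value_list]
-- ===== Notes on version B (the rewrite author's own statement) =====
-- stated objective: simpler
-- what changed: Replaces A's sort-then-scan-for-first-match with a direct count: each element's rank is 1 plus the number of elements strictly outranking it, computed in one comprehension with no sorting.
import Mathlib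
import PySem

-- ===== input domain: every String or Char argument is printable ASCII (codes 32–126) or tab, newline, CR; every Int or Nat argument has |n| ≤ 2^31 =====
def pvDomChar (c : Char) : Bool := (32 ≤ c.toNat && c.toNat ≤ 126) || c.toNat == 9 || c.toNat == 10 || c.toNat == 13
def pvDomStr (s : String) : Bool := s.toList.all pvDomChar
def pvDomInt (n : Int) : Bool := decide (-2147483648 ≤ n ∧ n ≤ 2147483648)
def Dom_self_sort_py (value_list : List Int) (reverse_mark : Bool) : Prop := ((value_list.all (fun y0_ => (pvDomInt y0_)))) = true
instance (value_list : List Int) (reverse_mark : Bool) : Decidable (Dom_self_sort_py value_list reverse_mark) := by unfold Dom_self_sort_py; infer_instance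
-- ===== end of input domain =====

-- B replaces A's sort-then-scan-for-first-int-match with a direct count (rank = 1 + number of strictly outranking elements); simpler, no sorting.


-- ===== PORT A =====
-- inner 'for pos_mark, num_mark in zip(...): if int(num)==int(num_mark): append pos_mark; break'
def ssInner (pairs : List (Int × Int)) (num : Int) : List Int :=
  match pairs with
  | [] => []
  | (pos_mark, num_mark) :: rest =>
      if num = num_mark then [pos_mark] else ssInner rest num

def self_sort_py (value_list : List Int) (reverse_mark : Bool) : List Int :=
  let position_list := PySem.List.pyRange 1 ((value_list.length : Int) + 1) 1
  let sorted_value := PySem.List.sorted value_list (fun x => x) reverse_mark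
  value_list.foldl (fun position_info num =>
    position_info ++ ssInner (position_list.zip sorted_value) num) []

-- ===== PORT B =====
def self_sort_py_alt (value_list : List Int) (reverse_mark : Bool) : List Int :=
  if reverse_mark then
    value_list.map (fun num => 1 + (value_list.countP (fun x => num < x) : Int))
  else
    value_list.map (fun num => 1 + (value_list.countP (fun x => x < num) : Int))

-- ===== PRECONDITION & SPEC =====
def Spec_self_sort_py (value_list : List Int) (reverse_mark : Bool) (out : List Int) : Prop := out = self_sort_py_alt value_list reverse_mark
instance (value_list : List Int) (reverse_mark : Bool) (out : List Int) : Decidable (Spec_self_sort_py value_list reverse_mark out) := by unfold Spec_self_sort_py; infer_instance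

-- ===== CLAIM (what is proved, stated in full; the proofs are below) =====
def Claim_equal_self_sort_py : Prop := ∀ (value_list : List Int) (reverse_mark : Bool), Dom_self_sort_py value_list reverse_mark → Spec_self_sort_py value_list reverse_mark (self_sort_py value_list reverse_mark)

-- ===== LEMMAS AND PROOFS =====

-- first-match position in a descending sorted list = 1 + count of strictly greater elements
lemma ssInner_desc (s : List Int) (p num : Int) (hmem : num ∈ s)
    (hord : s.Pairwise (fun a b => b ≤ a)) :
    ssInner ((PySem.List.pyRange p (p + (s.length : Int)) 1).zip s) num
      = [p + (s.countP (fun x => num < x) : Int)] := by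
  induction s generalizing p with
  | nil => cases hmem
  | cons m t ih =>
    have hcons : PySem.List.pyRange p (p + ((m :: t).length : Int)) 1
        = p :: PySem.List.pyRange (p + 1) (p + ((m :: t).length : Int)) 1 :=
      PySem.List.pyRange_one_cons (by simp only [List.length_cons]; push_cast; omega)
    rw [hcons]
    simp only [List.zip_cons_cons, ssInner]
    rcases List.pairwise_cons.mp hord with ⟨hle, ht⟩
    by_cases h : num = m
    · subst h
      have hz : t.countP (fun x => num < x) = 0 := by
        rw [List.countP_eq_zero]
        intro x hx; simpa using not_lt.mpr (hle x hx)
      simp [hz]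
    · have hnt : num ∈ t := by cases hmem with
        | head => exact absurd rfl h
        | tail _ hx => exact hx
      have hlt : num < m := lt_of_le_of_ne (hle num hnt) h
      have harg : p + ((m :: t).length : Int) = (p + 1) + (t.length : Int) := by
        simp; omega
      rw [if_neg h, harg, ih (p + 1) hnt ht]
      simp [hlt]
      omega

-- first-match position in an ascending sorted list = 1 + count of strictly smaller elements
lemma ssInner_asc (s : List Int) (p num : Int) (hmem : num ∈ s)
    (hord : s.Pairwise (fun a b => a ≤ b)) :
    ssInner ((PySem.List.pyRange p (p + (s.length : Int)) 1).zip s) num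
      = [p + (s.countP (fun x => x < num) : Int)] := by
  induction s generalizing p with
  | nil => cases hmem
  | cons m t ih =>
    have hcons : PySem.List.pyRange p (p + ((m :: t).length : Int)) 1
        = p :: PySem.List.pyRange (p + 1) (p + ((m :: t).length : Int)) 1 :=
      PySem.List.pyRange_one_cons (by simp only [List.length_cons]; push_cast; omega)
    rw [hcons]
    simp only [List.zip_cons_cons, ssInner]
    rcases List.pairwise_cons.mp hord with ⟨hle, ht⟩
    by_cases h : num = m
    · subst h
      have hz : t.countP (fun x => x < num) = 0 := by
        rw [List.countP_eq_zero]
        intro x hx; simpa using not_lt.mpr (hle x hx)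
      simp [hz]
    · have hnt : num ∈ t := by cases hmem with
        | head => exact absurd rfl h
        | tail _ hx => exact hx
      have hlt : m < num := lt_of_le_of_ne (hle num hnt) (fun e => h e.symm)
      have harg : p + ((m :: t).length : Int) = (p + 1) + (t.length : Int) := by
        simp; omega
      rw [if_neg h, harg, ih (p + 1) hnt ht]
      simp [hlt]
      omega

lemma foldl_app_singleton {α β : Type} (l : List α) (h : α → List β) (g : α → β)
    (acc : List β) (hh : ∀ x ∈ l, h x = [g x]) :
    l.foldl (fun acc x => acc ++ h x) acc = acc ++ l.map g := by
  induction l generalizing acc with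
  | nil => simp
  | cons m t ih =>
    simp only [List.foldl_cons, List.map_cons]
    rw [hh m (List.mem_cons_self), ih _ (fun x hx => hh x (List.mem_cons_of_mem _ hx))]
    simp

-- ===== VERDICT (by name: the statement is the Claim_ definition above) =====
theorem self_sort_py_spec : Claim_equal_self_sort_py := by
  intro value_list reverse_mark _
  unfold Spec_self_sort_py self_sort_py self_sort_py_alt
  cases reverse_mark with
  | true =>
    have hperm := PySem.List.sorted_perm value_list (fun x => x) true
    have hlen : ((PySem.List.sorted value_list (fun x => x) true).length : Int)
        = (value_list.length : Int) := by exact_mod_cast hperm.length_eq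
    rw [foldl_app_singleton value_list _
        (fun num => 1 + (value_list.countP (fun x => num < x) : Int)) [] ?_]
    · simp
    · intro num hnum
      have hmem : num ∈ PySem.List.sorted value_list (fun x => x) true := hperm.mem_iff.mpr hnum
      have hord : (PySem.List.sorted value_list (fun x => x) true).Pairwise (fun a b => b ≤ a) :=
        PySem.List.sorted_pairwise_rev value_list (fun x => x)
      have key := ssInner_desc _ 1 num hmem hord
      rw [hlen, add_comm 1 ((value_list.length : Int))] at key
      rw [key, hperm.countP_eq]
  | false =>
    have hperm := PySem.List.sorted_perm value_list (fun x => x) false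
    have hlen : ((PySem.List.sorted value_list (fun x => x) false).length : Int)
        = (value_list.length : Int) := by exact_mod_cast hperm.length_eq
    simp only [Bool.false_eq_true, if_false]
    rw [foldl_app_singleton value_list _
        (fun num => 1 + (value_list.countP (fun x => x < num) : Int)) [] ?_]
    · simp
    · intro num hnum
      have hmem : num ∈ PySem.List.sorted value_list (fun x => x) false := hperm.mem_iff.mpr hnum
      have hord : (PySem.List.sorted value_list (fun x => x) false).Pairwise (fun a b => a ≤ b) :=
        PySem.List.sorted_pairwise value_list (fun x => x)
      have key := ssInner_asc _ 1 num hmem hord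
      rw [hlen, add_comm 1 ((value_list.length : Int))] at key
      rw [key, hperm.countP_eq]
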